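-- pv_equiv track=rewrite | github.com/andreasgriffin/bitcoin-qr-tools | bitcoin_qrreader/multipath_descriptor.py | descsum_polymod
-- ===== SOURCE A (Python) =====
-- GENERATOR = [0xF5DEE51989, 0xA9FDCA3312, 0x1BAB10E32D, 0x3706B1677A, 0x644D626FFD]
--
-- def descsum_polymod(symbols):
--     """Internal function that computes the descriptor checksum."""
--     chk = 1
--     for value in symbols:
--         top = chk >> 35
--         chk = (chk & 0x7FFFFFFFF) << 5 ^ value
--         for i in range(5):
--             chk ^= GENERATOR[i] if ((top >> i) & 1) else 0
--     return chk
-- ===== SOURCE B (Python) =====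
-- GENERATOR = [0xF5DEE51989, 0xA9FDCA3312, 0x1BAB10E32D, 0x3706B1677A, 0x644D626FFD]
--
-- # 32-entry table: _TABLE[t] = XOR of GENERATOR[i] over the bits i set in t,
-- # built once by subset doubling.
-- _TABLE = [0]
-- for _g in GENERATOR:
--     _TABLE += [_v ^ _g for _v in _TABLE]
--
--
-- def descsum_polymod(symbols):
--     """Internal function that computes the descriptor checksum."""
--     chk = 1
--     for value in symbols:
--         chk = ((chk & 0x7FFFFFFFF) << 5) ^ value ^ _TABLE[(chk >> 35) & 31]
--     return chk
-- ===== Notes on version B (the rewrite author's own statement) =====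
-- stated objective: faster
-- what changed: A's inner 5-iteration loop over GENERATOR bits is removed entirely: B precomputes a 32-entry table of generator-subset XORs once (by subset doubling) and folds each symbol with a single table lookup T[(chk >> 35) & 31].
import Mathlib
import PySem

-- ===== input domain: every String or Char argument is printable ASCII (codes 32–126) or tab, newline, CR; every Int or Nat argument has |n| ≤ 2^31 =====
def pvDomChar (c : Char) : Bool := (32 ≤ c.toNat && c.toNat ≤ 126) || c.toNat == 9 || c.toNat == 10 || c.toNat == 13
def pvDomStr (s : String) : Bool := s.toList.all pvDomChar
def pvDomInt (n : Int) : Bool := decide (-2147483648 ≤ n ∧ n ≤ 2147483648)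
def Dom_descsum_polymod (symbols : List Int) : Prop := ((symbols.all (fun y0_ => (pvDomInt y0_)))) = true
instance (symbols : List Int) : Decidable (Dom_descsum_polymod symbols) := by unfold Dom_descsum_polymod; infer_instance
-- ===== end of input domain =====

-- B replaces A's 5-iteration inner generator loop by a single lookup in a 32-entry
-- table of precomputed generator-subset XORs (built once by subset doubling).

-- ===== PORT A =====
def pvGEN : List Int := [0xF5DEE51989, 0xA9FDCA3312, 0x1BAB10E32D, 0x3706B1677A, 0x644D626FFD]

def descsum_polymod (symbols : List Int) : Int :=
  symbols.foldl (fun chk value =>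
    let top := chk >>> 35
    let chk1 := PySem.Int.bxor ((PySem.Int.band chk 0x7FFFFFFFF) <<< 5) value
    (PySem.List.pyRange 0 5 1).foldl (fun c i =>
      PySem.Int.bxor c
        (if PySem.Int.band (top >>> i.toNat) 1 ≠ 0 then PySem.List.pyGetD pvGEN i 0 else 0))
      chk1) 1

-- ===== PORT B =====
-- _TABLE of Source B: 32 subset-XORs of the generators, built by doubling.
def pvTable : List Int :=
  List.foldl (fun T g => T ++ T.map (fun v => PySem.Int.bxor v g)) [0] pvGEN

def descsum_polymod_alt (symbols : List Int) : Int :=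
  symbols.foldl (fun chk value =>
    PySem.Int.bxor
      (PySem.Int.bxor ((PySem.Int.band chk 0x7FFFFFFFF) <<< 5) value)
      (PySem.List.pyGetD pvTable (PySem.Int.band (chk >>> 35) 31) 0)) 1

-- ===== PRECONDITION & SPEC =====
def Spec_descsum_polymod (symbols : List Int) (out : Int) : Prop := out = descsum_polymod_alt symbols
instance (symbols : List Int) (out : Int) : Decidable (Spec_descsum_polymod symbols out) := by unfold Spec_descsum_polymod; infer_instance

-- ===== CLAIM (what is proved, stated in full; the proofs are below) =====
def Claim_equal_descsum_polymod : Prop := ∀ (symbols : List Int), Dom_descsum_polymod symbols → Spec_descsum_polymod symbols (descsum_polymod symbols)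

-- ===== LEMMAS AND PROOFS =====

-- two's-complement representation: pvDec f n is n if f = false, and -n-1 if f = true
def pvDec (f : Bool) (n : Nat) : Int := if f then -(n : Int) - 1 else n

lemma pv_bxor_dec (f g : Bool) (m n : Nat) :
    PySem.Int.bxor (pvDec f m) (pvDec g n) = pvDec (f != g) (m ^^^ n) := by
  cases f <;> cases g <;>
    (simp [pvDec, PySem.Int.bxor, Int.toNat_natCast]; try omega)

lemma pv_repr (a : Int) :
    a = pvDec (decide (a < 0)) (if a < 0 then (-a - 1).toNat else a.toNat) := by
  by_cases h : a < 0 <;> (simp [pvDec, h]; try omega)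

lemma pv_bxor_assoc (a b c : Int) :
    PySem.Int.bxor (PySem.Int.bxor a b) c = PySem.Int.bxor a (PySem.Int.bxor b c) := by
  rw [pv_repr a, pv_repr b, pv_repr c]
  rw [pv_bxor_dec, pv_bxor_dec, pv_bxor_dec, pv_bxor_dec, Nat.xor_assoc]
  congr 1
  cases decide (a < 0) <;> cases decide (b < 0) <;> cases decide (c < 0) <;> rfl

lemma pv_mod2 (a : Int) : PySem.Int.mod a 2 = a % 2 := by
  simp [PySem.Int.mod, Int.fmod_eq_emod]

lemma pv_band31 (t : Int) : PySem.Int.band t 31 = t % 32 := by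
  have h32 : ∀ n : Nat, n &&& 31 = n % 32 := fun n => Nat.and_two_pow_sub_one_eq_mod n 5
  unfold PySem.Int.band
  simp only [show Int.toNat 31 = 31 from rfl]
  split_ifs with h h' h'
  · rw [h32]; omega
  · omega
  · rw [Nat.and_comm, h32]; omega
  · omega

lemma pv_bit5 (t : Int) (i : Nat) (h : i < 5) :
    PySem.Int.band (t >>> (i : Int)) 1 = t % 32 / 2 ^ i % 2 := by
  rw [Int.shiftRight_natCast_right, PySem.Int.band_one, pv_mod2, Int.shiftRight_eq_div_pow]
  interval_cases i <;> push_cast <;> omega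

lemma pv_chain (base A B C D E F : Int)
    (h : PySem.Int.bxor (PySem.Int.bxor (PySem.Int.bxor (PySem.Int.bxor A B) C) D) E = F) :
    PySem.Int.bxor (PySem.Int.bxor (PySem.Int.bxor (PySem.Int.bxor (PySem.Int.bxor base A) B) C) D) E
      = PySem.Int.bxor base F := by
  rw [← h]; simp only [pv_bxor_assoc]

lemma pv_step (t base : Int) :
    (PySem.List.pyRange 0 5 1).foldl (fun c i =>
      PySem.Int.bxor c
        (if PySem.Int.band (t >>> i.toNat) 1 ≠ 0 then PySem.List.pyGetD pvGEN i 0 else 0))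
      base
    = PySem.Int.bxor base (PySem.List.pyGetD pvTable (PySem.Int.band t 31) 0) := by
  rw [pv_band31]
  have hrange : PySem.List.pyRange 0 5 1 = [0, 1, 2, 3, 4] := by decide
  rw [hrange]
  simp only [List.foldl, show ((Int.toNat 0 : Nat) : Int) = ((0 : Nat) : Int) from rfl,
    show ((Int.toNat 1 : Nat) : Int) = ((1 : Nat) : Int) from rfl,
    show ((Int.toNat 2 : Nat) : Int) = ((2 : Nat) : Int) from rfl,
    show ((Int.toNat 3 : Nat) : Int) = ((3 : Nat) : Int) from rfl,
    show ((Int.toNat 4 : Nat) : Int) = ((4 : Nat) : Int) from rfl]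
  rw [pv_bit5 t 0 (by omega), pv_bit5 t 1 (by omega), pv_bit5 t 2 (by omega),
      pv_bit5 t 3 (by omega), pv_bit5 t 4 (by omega)]
  have h1 : 0 ≤ t % 32 := Int.emod_nonneg t (by norm_num)
  have h2 : t % 32 < 32 := Int.emod_lt_of_pos t (by norm_num)
  set r := t % 32 with hr
  interval_cases r <;> exact pv_chain _ _ _ _ _ _ _ (by decide)

theorem pv_main (symbols : List Int) : descsum_polymod symbols = descsum_polymod_alt symbols := by
  unfold descsum_polymod descsum_polymod_alt
  have hf : (fun (chk value : Int) =>
      let top := chk >>> 35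
      let chk1 := PySem.Int.bxor ((PySem.Int.band chk 0x7FFFFFFFF) <<< 5) value
      (PySem.List.pyRange 0 5 1).foldl (fun c i =>
        PySem.Int.bxor c
          (if PySem.Int.band (top >>> i.toNat) 1 ≠ 0 then PySem.List.pyGetD pvGEN i 0 else 0))
        chk1)
      = (fun (chk value : Int) =>
        PySem.Int.bxor
          (PySem.Int.bxor ((PySem.Int.band chk 0x7FFFFFFFF) <<< 5) value)
          (PySem.List.pyGetD pvTable (PySem.Int.band (chk >>> 35) 31) 0)) := by
    funext chk value
    exact pv_step (chk >>> 35) (PySem.Int.bxor ((PySem.Int.band chk 0x7FFFFFFFF) <<< 5) value)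
  rw [hf]

-- ===== VERDICT (by name: the statement is the Claim_ definition above) =====
theorem descsum_polymod_spec : Claim_equal_descsum_polymod := by
  intro symbols _
  exact pv_main symbols
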